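-- pv_equiv track=rewrite | github.com/BigOrange666/GOODScanner | test_solver.py | find_assignment
-- ===== SOURCE A (Python) =====
-- def find_assignment(valid_counts_list, total_rolls):
--     """Backtracking search for roll count assignment summing to total_rolls."""
--     n = len(valid_counts_list)
--     assignment = [0] * n
--
--     def bt(idx, remaining):
--         if idx == n:
--             return remaining == 0
--         min_rest = sum(min(vc) for vc in valid_counts_list[idx + 1:])
--         for count in valid_counts_list[idx]:
--             if count > remaining:
--                 continue
--             left = remaining - count
--             if left < min_rest:
--                 continue
--             assignment[idx] = count
--             if bt(idx + 1, left):
--                 return True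
--         return False
--
--     if bt(0, total_rolls):
--         return assignment
--     return None
-- ===== SOURCE B (Python) =====
-- def find_assignment(valid_counts_list, total_rolls):
--     """DP: forward reachable remainders, backward solvable marking, greedy reconstruction."""
--     n = len(valid_counts_list)
--     suffix = [0] * (n + 1)
--     for i in range(n - 1, 0, -1):
--         suffix[i] = suffix[i + 1] + min(valid_counts_list[i])
--     # forward: remainders reachable at each index under the same pruning bounds
--     reach = [set() for _ in range(n + 1)]
--     reach[0].add(total_rolls)
--     for i in range(n):
--         for r in reach[i]:
--             for c in valid_counts_list[i]:
--                 if c <= r and r - c >= suffix[i + 1]: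
--                     reach[i + 1].add(r - c)
--     # backward: which reachable remainders can be completed to an exact total
--     solv = [set() for _ in range(n + 1)]
--     if 0 in reach[n]:
--         solv[n].add(0)
--     for i in range(n - 1, -1, -1):
--         for r in reach[i]:
--             if any(c <= r and r - c >= suffix[i + 1] and r - c in solv[i + 1]
--                    for c in valid_counts_list[i]):
--                 solv[i].add(r)
--     if total_rolls not in solv[0]:
--         return None
--     out = []
--     r = total_rolls
--     for i in range(n):
--         for c in valid_counts_list[i]:
--             if c <= r and r - c >= suffix[i + 1] and r - c in solv[i + 1]:
--                 out.append(c)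
--                 r -= c
--                 break
--     return out
-- ===== Notes on version B (the rewrite author's own statement) =====
-- stated objective: alternative
-- what changed: Replaces the recursive backtracking search with an iterative subset-sum DP (forward reachable-remainder sets, backward solvable-remainder marking under the same pruning bounds) followed by a greedy first-in-list-order reconstruction; it trades DFS early exit for tabulation, avoiding the exponential worst case on infeasible instances.
import Mathlib
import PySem

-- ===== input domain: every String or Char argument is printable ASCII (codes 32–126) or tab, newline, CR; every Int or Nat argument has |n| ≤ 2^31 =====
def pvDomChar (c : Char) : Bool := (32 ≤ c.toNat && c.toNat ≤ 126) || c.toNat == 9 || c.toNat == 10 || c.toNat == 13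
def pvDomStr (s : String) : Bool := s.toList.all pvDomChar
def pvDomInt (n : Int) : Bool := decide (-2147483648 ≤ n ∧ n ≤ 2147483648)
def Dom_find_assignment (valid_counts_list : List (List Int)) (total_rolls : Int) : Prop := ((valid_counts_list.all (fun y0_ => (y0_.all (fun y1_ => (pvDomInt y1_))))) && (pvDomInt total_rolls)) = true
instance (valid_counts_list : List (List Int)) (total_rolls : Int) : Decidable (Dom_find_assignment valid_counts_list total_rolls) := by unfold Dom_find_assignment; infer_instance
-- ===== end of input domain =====

-- B replaces A's recursive backtracking by an iterative reachability DP (forward reachable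
-- remainders, backward solvable marking under the same pruning bounds) plus greedy
-- reconstruction; equal return value on all inputs where the Python A returns (Pre_).


-- ===== PORT A =====
-- min(vc) (total form; Pre_ guarantees every list whose min A or B takes is nonempty)
def pyMinI (l : List Int) : Int := (PySem.List.min? l (fun x => x)).getD 0

-- sum(min(vc) for vc in valid_counts_list[idx+1:])
def minRestA (vcl : List (List Int)) (idx : Nat) : Int :=
  ((PySem.List.slice vcl (some ((idx : Int) + 1)) none).map pyMinI).sum

mutual
-- bt(idx, remaining), threading the mutated `assignment`; fuel > n - idx (n+1 at top) so
-- the fuel-0 branch is unreachable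
def btA (vcl : List (List Int)) (n : Nat) (fuel idx : Nat) (remaining : Int)
    (a : List Int) : Bool × List Int :=
  match fuel with
  | 0 => (false, a)
  | fuel' + 1 =>
    if idx = n then (decide (remaining = 0), a)
    else btLoopA vcl n fuel' idx remaining (vcl.getD idx []) a
termination_by (fuel, 0)

-- the `for count in valid_counts_list[idx]` loop
def btLoopA (vcl : List (List Int)) (n : Nat) (fuel idx : Nat) (remaining : Int)
    (counts : List Int) (a : List Int) : Bool × List Int :=
  match counts with
  | [] => (false, a)
  | c :: cs =>
    if c > remaining then btLoopA vcl n fuel idx remaining cs a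
    else
      let left := remaining - c
      if left < minRestA vcl idx then btLoopA vcl n fuel idx remaining cs a
      else
        match btA vcl n fuel (idx + 1) left (a.set idx c) with
        | (true, a') => (true, a')
        | (false, a') => btLoopA vcl n fuel idx remaining cs a'
termination_by (fuel, counts.length + 1)
end

def find_assignment (valid_counts_list : List (List Int)) (total_rolls : Int) : Option (List Int) :=
  let n := valid_counts_list.length
  match btA valid_counts_list n (n + 1) 0 total_rolls (List.replicate n 0) with
  | (true, a) => some a
  | (false, _) => none

-- ===== PORT B =====
-- suffix[i] = suffix[i+1] + min(valid_counts_list[i]) for n-1 ≥ i ≥ 1, else 0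
def suffixB (vcl : List (List Int)) (i : Nat) : Int :=
  if i = 0 ∨ vcl.length ≤ i then 0
  else pyMinI (vcl.getD i []) + suffixB vcl (i + 1)
termination_by vcl.length - i

-- `c <= r and r - c >= suffix[i+1]`
def stepPredB (vcl : List (List Int)) (i : Nat) (r c : Int) : Bool :=
  decide (c ≤ r) && decide (suffixB vcl (i + 1) ≤ r - c)

-- reach[i]: remainders reachable at index i (forward pass)
def reachB (vcl : List (List Int)) (total : Int) : Nat → PySem.Set Int
  | 0 => PySem.Set.add PySem.Set.empty total
  | i + 1 =>
    (reachB vcl total i).foldl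
      (fun acc r =>
        (vcl.getD i []).foldl
          (fun acc2 c => if stepPredB vcl i r c then PySem.Set.add acc2 (r - c) else acc2)
          acc)
      PySem.Set.empty

-- solv[i]: reachable remainders completable to an exact total (backward pass)
def solvSetB (vcl : List (List Int)) (total : Int) (n i : Nat) : PySem.Set Int :=
  if n ≤ i then
    if PySem.Set.contains (reachB vcl total n) 0 then PySem.Set.add PySem.Set.empty 0
    else PySem.Set.empty
  else
    (reachB vcl total i).foldl
      (fun acc r =>
        if (vcl.getD i []).any (fun c => stepPredB vcl i r c &&
            PySem.Set.contains (solvSetB vcl total n (i + 1)) (r - c))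
        then PySem.Set.add acc r else acc)
      PySem.Set.empty
termination_by n - i

def find_assignment_alt (valid_counts_list : List (List Int)) (total_rolls : Int) : Option (List Int) :=
  let n := valid_counts_list.length
  if PySem.Set.contains (solvSetB valid_counts_list total_rolls n 0) total_rolls then
    some ((PySem.List.pyRange 0 (n : Int) 1).foldl
      (fun st i =>
        match (valid_counts_list.getD i.toNat []).find?
            (fun c => stepPredB valid_counts_list i.toNat st.2 c &&
              PySem.Set.contains (solvSetB valid_counts_list total_rolls n (i.toNat + 1)) (st.2 - c)) with
        | some c => (st.1 ++ [c], st.2 - c)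
        | none => st)
      (([] : List Int), total_rolls)).1
  else none

-- ===== PRECONDITION & SPEC =====
-- Pre_ excludes exactly the inputs where the Python A raises ValueError: min() over an
-- empty list at an index ≥ 1 (an empty head list is fine: A never takes its min).
def Pre_find_assignment (valid_counts_list : List (List Int)) (total_rolls : Int) : Prop :=
  ∀ l ∈ valid_counts_list.tail, l ≠ []
instance (valid_counts_list : List (List Int)) (total_rolls : Int) : Decidable (Pre_find_assignment valid_counts_list total_rolls) := by unfold Pre_find_assignment; infer_instance
def pvWitness_find_assignment : List (List Int) × Int := ([[1, 2], [2, 3]], 4)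

def Spec_find_assignment (valid_counts_list : List (List Int)) (total_rolls : Int) (out : Option (List Int)) : Prop := out = find_assignment_alt valid_counts_list total_rolls
instance (valid_counts_list : List (List Int)) (total_rolls : Int) (out : Option (List Int)) : Decidable (Spec_find_assignment valid_counts_list total_rolls out) := by unfold Spec_find_assignment; infer_instance

-- ===== CLAIM (what is proved, stated in full; the proofs are below) =====
def Claim_equal_find_assignment : Prop := ∀ (valid_counts_list : List (List Int)) (total_rolls : Int), Dom_find_assignment valid_counts_list total_rolls → Pre_find_assignment valid_counts_list total_rolls → Spec_find_assignment valid_counts_list total_rolls (find_assignment valid_counts_list total_rolls)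

-- ===== LEMMAS AND PROOFS =====

-- shared "spec" recursion: does the pruned search from (idx, r) succeed?
def predS (vcl : List (List Int)) (idx : Nat) (r c : Int) : Bool :=
  decide (c ≤ r) && decide (minRestA vcl idx ≤ r - c)

def solvS (vcl : List (List Int)) (idx : Nat) (r : Int) : Bool :=
  if h : idx < vcl.length then
    (vcl.getD idx []).any (fun c => predS vcl idx r c && solvS vcl (idx + 1) (r - c))
  else decide (r = 0)
termination_by vcl.length - idx

-- the first solution in DFS/list order
def greedyS (vcl : List (List Int)) (idx : Nat) (r : Int) : List Int :=
  if h : idx < vcl.length then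
    match (vcl.getD idx []).find? (fun c => predS vcl idx r c && solvS vcl (idx + 1) (r - c)) with
    | some c => c :: greedyS vcl (idx + 1) (r - c)
    | none => []
  else []
termination_by vcl.length - idx

theorem suffix_drop (vcl : List (List Int)) :
    ∀ k i, vcl.length - i ≤ k → 0 < i → suffixB vcl i = ((vcl.drop i).map pyMinI).sum := by
  intro k
  induction k with
  | zero =>
    intro i hk hi
    have hlen : vcl.length ≤ i := by omega
    rw [suffixB, if_pos (Or.inr hlen), List.drop_eq_nil_of_le hlen]
    simp
  | succ k ih =>
    intro i hk hi
    by_cases hlen : vcl.length ≤ i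
    · rw [suffixB, if_pos (Or.inr hlen), List.drop_eq_nil_of_le hlen]
      simp
    · have hlt : i < vcl.length := by omega
      rw [suffixB, if_neg (by omega), ih (i + 1) (by omega) (by omega),
        List.drop_eq_getElem_cons hlt]
      rw [List.getD_eq_getElem vcl [] hlt, List.map_cons, List.sum_cons]

theorem suffixB_eq (vcl : List (List Int)) (i : Nat) :
    suffixB vcl (i + 1) = minRestA vcl i := by
  rw [suffix_drop vcl vcl.length (i + 1) (by omega) (by omega), minRestA]
  have : ((i : Int) + 1) = ((i + 1 : Nat) : Int) := by push_cast; ring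
  rw [this, PySem.List.slice_from_natCast]

theorem stepPredB_eq (vcl : List (List Int)) (i : Nat) (r c : Int) :
    stepPredB vcl i r c = predS vcl i r c := by
  rw [stepPredB, predS, suffixB_eq]

-- membership in the if-guarded add-fold used by both B passes
theorem mem_foldl_add_if {a : Type} [BEq a] [LawfulBEq a] (p : a → Bool) (f : a → a)
    (g : PySem.Set a → a → PySem.Set a)
    (hg : ∀ s x, g s x = if p x then PySem.Set.add s (f x) else s) :
    ∀ (l : List a) (acc : PySem.Set a) (y : a),
      y ∈ l.foldl g acc ↔ y ∈ acc ∨ ∃ x ∈ l, p x = true ∧ y = f x := by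
  intro l
  induction l with
  | nil => simp
  | cons x xs ih =>
    intro acc y
    rw [List.foldl_cons, ih, hg]
    by_cases hp : p x = true
    · rw [if_pos hp]
      rw [PySem.Set.mem_add]
      constructor
      · rintro (⟨h | h⟩ | ⟨x', hx', hpx', rfl⟩)
        · exact Or.inl h
        · exact Or.inr ⟨x, by simp, hp, h⟩
        · exact Or.inr ⟨x', by simp [hx'], hpx', rfl⟩
      · rintro (h | ⟨x', hx', hpx', rfl⟩)
        · exact Or.inl (Or.inl h)
        · rcases List.mem_cons.1 hx' with rfl | hx'
          · exact Or.inl (Or.inr rfl)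
          · exact Or.inr ⟨x', hx', hpx', rfl⟩
    · rw [if_neg hp]
      constructor
      · rintro (h | ⟨x', hx', hpx', rfl⟩)
        · exact Or.inl h
        · exact Or.inr ⟨x', List.mem_cons_of_mem _ hx', hpx', rfl⟩
      · rintro (h | ⟨x', hx', hpx', rfl⟩)
        · exact Or.inl h
        · rcases List.mem_cons.1 hx' with rfl | hx'
          · simp [hp] at hpx'
          · exact Or.inr ⟨x', hx', hpx', rfl⟩

theorem find?_congr_mem {a : Type} (p q : a → Bool) :
    ∀ (l : List a), (∀ x ∈ l, p x = q x) → l.find? p = l.find? q := by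
  intro l
  induction l with
  | nil => intro _; rfl
  | cons x xs ih =>
    intro h
    by_cases hx : p x = true
    · rw [List.find?_cons_of_pos hx, List.find?_cons_of_pos (by rw [← h x (by simp)]; exact hx)]
    · rw [List.find?_cons_of_neg hx, List.find?_cons_of_neg (by rw [← h x (by simp)]; exact hx),
        ih (fun y hy => h y (by simp [hy]))]

-- (a.set idx c).take (idx+1) = a.take idx ++ [c] for idx < a.length
theorem take_succ_set (a : List Int) (idx : Nat) (c : Int) (h : idx < a.length) :
    (a.set idx c).take (idx + 1) = a.take idx ++ [c] := by
  rw [List.set_eq_take_append_cons_drop, if_pos h, List.take_append]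
  have hlen : (a.take idx).length = idx := by simp; omega
  rw [hlen, List.take_take]
  simp [Nat.min_def]

theorem take_of_take_succ (a b : List Int) (idx : Nat) (c : Int) (hidx : idx < a.length)
    (h : b.take (idx + 1) = (a.set idx c).take (idx + 1)) : b.take idx = a.take idx := by
  have := congrArg (List.take idx) h
  rw [List.take_take, List.take_take] at this
  simp [Nat.min_def] at this
  rw [this, List.take_set, List.set_eq_of_length_le (by simp)]

-- the backtracking search: success flag is solvS, prefix below idx is preserved, and on
-- success the final assignment is the prefix plus the greedy/DFS-first path
theorem btA_spec (vcl : List (List Int)) :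
    ∀ fuel idx r a, vcl.length < fuel + idx → idx ≤ vcl.length → a.length = vcl.length →
      (btA vcl vcl.length fuel idx r a).1 = solvS vcl idx r ∧
      (btA vcl vcl.length fuel idx r a).2.length = vcl.length ∧
      (btA vcl vcl.length fuel idx r a).2.take idx = a.take idx ∧
      (solvS vcl idx r = true →
        (btA vcl vcl.length fuel idx r a).2 = a.take idx ++ greedyS vcl idx r) := by
  intro fuel
  induction fuel with
  | zero => intro idx r a hfuel hidx _; omega
  | succ fuel ih =>
    intro idx r a hfuel hidx hlen
    by_cases hn : idx = vcl.length
    · subst hn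
      rw [btA, if_pos rfl]
      have hnl : ¬ (vcl.length < vcl.length) := by omega
      have hta : a.take vcl.length = a := by rw [← hlen]; exact List.take_length
      refine ⟨by simp [solvS, hnl], by simpa, rfl, ?_⟩
      intro _
      rw [greedyS, dif_neg hnl]
      simp [hta]
    · have hlt : idx < vcl.length := by omega
      have loop : ∀ (counts : List Int) (a : List Int), a.length = vcl.length →
          (btLoopA vcl vcl.length fuel idx r counts a).1 =
            counts.any (fun c => predS vcl idx r c && solvS vcl (idx + 1) (r - c)) ∧
          (btLoopA vcl vcl.length fuel idx r counts a).2.length = vcl.length ∧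
          (btLoopA vcl vcl.length fuel idx r counts a).2.take idx = a.take idx ∧
          (∀ c₀, counts.find? (fun c => predS vcl idx r c && solvS vcl (idx + 1) (r - c)) = some c₀ →
            (btLoopA vcl vcl.length fuel idx r counts a).2 =
              a.take idx ++ c₀ :: greedyS vcl (idx + 1) (r - c₀)) := by
        intro counts
        induction counts with
        | nil =>
          intro a ha
          rw [btLoopA]
          refine ⟨rfl, ha, rfl, ?_⟩
          intro c₀ hf
          simp at hf
        | cons c cs ihc =>
          intro a ha
          by_cases h1 : c > r
          · have hp : (predS vcl idx r c && solvS vcl (idx + 1) (r - c)) = false := by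
              have : predS vcl idx r c = false := by simp [predS]; omega
              simp [this]
            rw [btLoopA]
            simp only [if_pos h1]
            rcases ihc a ha with ⟨e1, e2, e3, e4⟩
            refine ⟨by rw [e1]; simp [hp], e2, e3, ?_⟩
            intro c₀ hf
            rw [List.find?_cons_of_neg (by simp [hp])] at hf
            exact e4 c₀ hf
          · by_cases h2 : r - c < minRestA vcl idx
            · have hp : (predS vcl idx r c && solvS vcl (idx + 1) (r - c)) = false := by
                have : predS vcl idx r c = false := by simp [predS]; omega
                simp [this]
              rw [btLoopA]
              simp only [if_neg h1, if_pos h2]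
              rcases ihc a ha with ⟨e1, e2, e3, e4⟩
              refine ⟨by rw [e1]; simp [hp], e2, e3, ?_⟩
              intro c₀ hf
              rw [List.find?_cons_of_neg (by simp [hp])] at hf
              exact e4 c₀ hf
            · have hpred : predS vcl idx r c = true := by
                simp [predS]; omega
              have hsetlen : (a.set idx c).length = vcl.length := by simpa using ha
              rcases ih (idx + 1) (r - c) (a.set idx c) (by omega) (by omega) hsetlen with
                ⟨b1, b2, b3, b4⟩
              have hidxa : idx < a.length := by omega
              rw [btLoopA]
              simp only [if_neg h1, if_neg h2]
              cases hsv : solvS vcl (idx + 1) (r - c) with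
              | true =>
                have hok : btA vcl vcl.length fuel (idx + 1) (r - c) (a.set idx c) =
                    (true, (a.set idx c).take (idx + 1) ++ greedyS vcl (idx + 1) (r - c)) := by
                  have h4 := b4 hsv
                  rw [hsv] at b1
                  exact Prod.ext b1 h4
                rw [hok]
                have htk : (a.set idx c).take (idx + 1) = a.take idx ++ [c] :=
                  take_succ_set a idx c hidxa
                refine ⟨by simp [hpred, hsv], ?_, ?_, ?_⟩
                · have := b2
                  rw [hok] at this
                  simpa using this
                · have hl : (a.take idx).length = idx := by simp; omega
                  rw [htk, List.append_assoc, List.take_append, hl]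
                  simp [List.take_take]
                · intro c₀ hf
                  rw [List.find?_cons_of_pos (by simp [hpred, hsv])] at hf
                  injection hf with hf
                  subst hf
                  rw [htk, List.append_assoc]
                  rfl
              | false =>
                have hp : (predS vcl idx r c && solvS vcl (idx + 1) (r - c)) = false := by
                  simp [hsv]
                rcases hE : btA vcl vcl.length fuel (idx + 1) (r - c) (a.set idx c) with ⟨ok, a'⟩
                rw [hE] at b1 b2 b3
                simp only [hsv] at b1
                subst b1
                rcases ihc a' b2 with ⟨e1, e2, e3, e4⟩
                have ha' : a'.take idx = a.take idx := take_of_take_succ a a' idx c hidxa b3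
                refine ⟨by rw [e1]; simp [hp], e2, by rw [e3, ha'], ?_⟩
                intro c₀ hf
                rw [List.find?_cons_of_neg (by simp [hp])] at hf
                rw [e4 c₀ hf, ha']
      rw [btA, if_neg hn]
      rcases loop (vcl.getD idx []) a hlen with ⟨l1, l2, l3, l4⟩
      refine ⟨by rw [l1, solvS, dif_pos hlt], l2, l3, ?_⟩
      intro hs
      have hs' := hs
      rw [solvS, dif_pos hlt, List.any_eq_true] at hs'
      have hfs : ((vcl.getD idx []).find?
          (fun c => predS vcl idx r c && solvS vcl (idx + 1) (r - c))).isSome := by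
        rw [List.find?_isSome]; exact hs'
      obtain ⟨c₀, hc⟩ := Option.isSome_iff_exists.1 hfs
      rw [greedyS, dif_pos hlt, hc]
      exact l4 c₀ hc

theorem mem_reach_succ (vcl : List (List Int)) (total : Int) (i : Nat) (y : Int) :
    y ∈ reachB vcl total (i + 1) ↔
      ∃ r ∈ reachB vcl total i, ∃ c ∈ vcl.getD i [], stepPredB vcl i r c = true ∧ y = r - c := by
  rw [reachB]
  have gen : ∀ (l : List Int) (acc : PySem.Set Int) (y : Int),
      y ∈ l.foldl (fun acc r => (vcl.getD i []).foldl
          (fun acc2 c => if stepPredB vcl i r c then PySem.Set.add acc2 (r - c) else acc2) acc)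
        acc ↔ y ∈ acc ∨ ∃ r ∈ l, ∃ c ∈ vcl.getD i [], stepPredB vcl i r c = true ∧ y = r - c := by
    intro l
    induction l with
    | nil => simp
    | cons rr ls ihl =>
      intro acc y
      rw [List.foldl_cons, ihl,
        mem_foldl_add_if (fun c => stepPredB vcl i rr c) (fun c => rr - c) _ (fun s x => rfl)]
      constructor
      · rintro (⟨h | ⟨c, hc, hp, rfl⟩⟩ | ⟨r', hr', c, hc, hp, rfl⟩)
        · exact Or.inl h
        · exact Or.inr ⟨rr, by simp, c, hc, hp, rfl⟩
        · exact Or.inr ⟨r', by simp [hr'], c, hc, hp, rfl⟩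
      · rintro (h | ⟨r', hr', c, hc, hp, rfl⟩)
        · exact Or.inl (Or.inl h)
        · rcases List.mem_cons.1 hr' with rfl | hr'
          · exact Or.inl (Or.inr ⟨c, hc, hp, rfl⟩)
          · exact Or.inr ⟨r', hr', c, hc, hp, rfl⟩
  rw [gen]
  simp [PySem.Set.empty]

theorem mem_solvSetB (vcl : List (List Int)) (total : Int) (n i : Nat) (hi : i < n) (y : Int) :
    y ∈ solvSetB vcl total n i ↔ y ∈ reachB vcl total i ∧
      ((vcl.getD i []).any (fun c => stepPredB vcl i y c &&
        PySem.Set.contains (solvSetB vcl total n (i + 1)) (y - c))) = true := by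
  rw [solvSetB, if_neg (by omega),
    mem_foldl_add_if
      (fun r => (vcl.getD i []).any (fun c => stepPredB vcl i r c &&
        PySem.Set.contains (solvSetB vcl total n (i + 1)) (r - c)))
      (fun r => r) _ (fun s x => rfl)]
  constructor
  · rintro (h | ⟨r', hr', hp, rfl⟩)
    · simp [PySem.Set.empty] at h
    · exact ⟨hr', hp⟩
  · rintro ⟨hr, hp⟩
    exact Or.inr ⟨y, hr, hp, rfl⟩

theorem solvSet_contains_base (vcl : List (List Int)) (total : Int) (r : Int)
    (hr : r ∈ reachB vcl total vcl.length) :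
    PySem.Set.contains (solvSetB vcl total vcl.length vcl.length) r =
      solvS vcl vcl.length r := by
  rw [solvSetB, if_pos (le_refl _)]
  have hsolv : solvS vcl vcl.length r = decide (r = 0) := by
    rw [solvS, dif_neg (by omega)]
  by_cases h0 : PySem.Set.contains (reachB vcl total vcl.length) 0 = true
  · rw [if_pos h0, hsolv, Bool.eq_iff_iff, PySem.Set.contains_iff]
    simp [PySem.Set.mem_add, PySem.Set.empty]
  · rw [if_neg h0, hsolv]
    have hr0 : r ≠ 0 := by
      rintro rfl
      exact h0 ((PySem.Set.contains_iff _ _).2 hr)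
    rw [Bool.eq_iff_iff, PySem.Set.contains_iff]
    simp [PySem.Set.empty, hr0]

theorem solvSet_contains (vcl : List (List Int)) (total : Int) :
    ∀ k i, vcl.length - i ≤ k → i ≤ vcl.length → ∀ r ∈ reachB vcl total i,
      PySem.Set.contains (solvSetB vcl total vcl.length i) r = solvS vcl i r := by
  intro k
  induction k with
  | zero =>
    intro i hk hi r hr
    have hieq : i = vcl.length := by omega
    rw [hieq] at hr ⊢
    exact solvSet_contains_base vcl total r hr
  | succ k ih =>
    intro i hk hi r hr
    by_cases hieq : i = vcl.length
    · rw [hieq] at hr ⊢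
      exact solvSet_contains_base vcl total r hr
    · have hlt : i < vcl.length := by omega
      rw [Bool.eq_iff_iff, PySem.Set.contains_iff, mem_solvSetB vcl total vcl.length i hlt]
      have hsolv : solvS vcl i r =
          (vcl.getD i []).any (fun c => predS vcl i r c && solvS vcl (i + 1) (r - c)) := by
        rw [solvS, dif_pos hlt]
      constructor
      · rintro ⟨-, hany⟩
        rw [hsolv, List.any_eq_true]
        rw [List.any_eq_true] at hany
        obtain ⟨c, hc, hcond⟩ := hany
        simp only [Bool.and_eq_true] at hcond
        obtain ⟨hstep, hcont⟩ := hcond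
        have hmem : r - c ∈ reachB vcl total (i + 1) :=
          (mem_reach_succ vcl total i (r - c)).2 ⟨r, hr, c, hc, hstep, rfl⟩
        have := ih (i + 1) (by omega) (by omega) (r - c) hmem
        rw [this] at hcont
        refine ⟨c, hc, ?_⟩
        rw [← stepPredB_eq, Bool.and_eq_true]
        exact ⟨hstep, hcont⟩
      · intro hsv
        refine ⟨hr, ?_⟩
        rw [hsolv, List.any_eq_true] at hsv
        obtain ⟨c, hc, hcond⟩ := hsv
        simp only [Bool.and_eq_true] at hcond
        obtain ⟨hpredc, hsolvc⟩ := hcond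
        have hstep : stepPredB vcl i r c = true := by rw [stepPredB_eq]; exact hpredc
        have hmem : r - c ∈ reachB vcl total (i + 1) :=
          (mem_reach_succ vcl total i (r - c)).2 ⟨r, hr, c, hc, hstep, rfl⟩
        have hcont := ih (i + 1) (by omega) (by omega) (r - c) hmem
        rw [List.any_eq_true]
        exact ⟨c, hc, by rw [Bool.and_eq_true]; exact ⟨hstep, hcont.trans hsolvc⟩⟩

theorem solvSet_contains' (vcl : List (List Int)) (total : Int) (i : Nat)
    (hi : i ≤ vcl.length) (r : Int) (hr : r ∈ reachB vcl total i) :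
    PySem.Set.contains (solvSetB vcl total vcl.length i) r = solvS vcl i r :=
  solvSet_contains vcl total (vcl.length - i) i (le_refl _) hi r hr

theorem greedy_fold (vcl : List (List Int)) (total : Int) :
    ∀ k i r out, vcl.length - i ≤ k → i ≤ vcl.length → r ∈ reachB vcl total i →
      solvS vcl i r = true →
      ((PySem.List.pyRange (i : Int) (vcl.length : Int) 1).foldl
        (fun st j =>
          match (vcl.getD j.toNat []).find?
              (fun c => stepPredB vcl j.toNat st.2 c &&
                PySem.Set.contains (solvSetB vcl total vcl.length (j.toNat + 1)) (st.2 - c)) with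
          | some c => (st.1 ++ [c], st.2 - c)
          | none => st)
        (out, r)).1 = out ++ greedyS vcl i r := by
  intro k
  induction k with
  | zero =>
    intro i r out hk hi _ _
    have hnil : PySem.List.pyRange (i : Int) (vcl.length : Int) 1 = [] := by
      rw [PySem.List.pyRange_one]
      have h0 : ((vcl.length : Int) - (i : Int)).toNat = 0 := by omega
      rw [h0]
      simp
    rw [hnil, greedyS, dif_neg (by omega)]
    simp
  | succ k ih =>
    intro i r out hk hi hr hs
    by_cases hieq : i = vcl.length
    · have hnil : PySem.List.pyRange (i : Int) (vcl.length : Int) 1 = [] := by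
        rw [PySem.List.pyRange_one]
        have h0 : ((vcl.length : Int) - (i : Int)).toNat = 0 := by omega
        rw [h0]
        simp
      rw [hnil, greedyS, dif_neg (by omega)]
      simp
    · have hlt : i < vcl.length := by omega
      rw [PySem.List.pyRange_one_cons (by exact_mod_cast hlt), List.foldl_cons]
      simp only [Int.toNat_natCast]
      have hs' := hs
      rw [solvS, dif_pos hlt, List.any_eq_true] at hs'
      have hcong : ∀ c ∈ vcl.getD i [],
          (stepPredB vcl i r c &&
            PySem.Set.contains (solvSetB vcl total vcl.length (i + 1)) (r - c)) =
          (predS vcl i r c && solvS vcl (i + 1) (r - c)) := by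
        intro c hc
        by_cases hp : predS vcl i r c = true
        · have hstep : stepPredB vcl i r c = true := by rw [stepPredB_eq]; exact hp
          have hmem : r - c ∈ reachB vcl total (i + 1) :=
            (mem_reach_succ vcl total i (r - c)).2 ⟨r, hr, c, hc, hstep, rfl⟩
          rw [stepPredB_eq, solvSet_contains' vcl total (i + 1) (by omega) (r - c) hmem]
        · have hp' : predS vcl i r c = false := by simpa using hp
          rw [stepPredB_eq, hp']
          simp
      have hfind := find?_congr_mem
        (fun c => stepPredB vcl i r c &&
          PySem.Set.contains (solvSetB vcl total vcl.length (i + 1)) (r - c))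
        (fun c => predS vcl i r c && solvS vcl (i + 1) (r - c))
        (vcl.getD i []) hcong
      have hfs : ((vcl.getD i []).find?
          (fun c => predS vcl i r c && solvS vcl (i + 1) (r - c))).isSome := by
        rw [List.find?_isSome]; exact hs'
      obtain ⟨c₀, hc₀⟩ := Option.isSome_iff_exists.1 hfs
      rw [show ((i : Int) + 1) = (((i + 1 : Nat)) : Int) by push_cast; ring]
      have hpc₀ := List.find?_some hc₀
      simp only [Bool.and_eq_true] at hpc₀
      obtain ⟨hpred₀, hsolv₀⟩ := hpc₀
      have hc₀mem : c₀ ∈ vcl.getD i [] := List.mem_of_find?_eq_some hc₀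
      have hstep₀ : stepPredB vcl i r c₀ = true := by rw [stepPredB_eq]; exact hpred₀
      have hmem₀ : r - c₀ ∈ reachB vcl total (i + 1) :=
        (mem_reach_succ vcl total i (r - c₀)).2 ⟨r, hr, c₀, hc₀mem, hstep₀, rfl⟩
      rw [show ((vcl.getD i []).find?
          (fun c => stepPredB vcl i (out, r).2 c &&
            PySem.Set.contains (solvSetB vcl total vcl.length (i + 1)) ((out, r).2 - c))) =
          some c₀ from hfind.trans hc₀]
      rw [ih (i + 1) (r - c₀) (out ++ [c₀]) (by omega) (by omega) hmem₀ hsolv₀]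
      conv_rhs => rw [greedyS]
      rw [dif_pos hlt, hc₀, List.append_assoc]
      rfl

-- ===== VERDICT (by name: the statement is the Claim_ definition above) =====
theorem find_assignment_spec : Claim_equal_find_assignment := by
  intro vcl total _ _
  unfold Spec_find_assignment
  simp only [find_assignment, find_assignment_alt]
  obtain ⟨A1, A2, A3, A4⟩ :=
    btA_spec vcl (vcl.length + 1) 0 total (List.replicate vcl.length 0)
      (by omega) (by omega) (by simp)
  have hmem0 : total ∈ reachB vcl total 0 := by
    simp [reachB, PySem.Set.mem_add, PySem.Set.empty]
  have hcon := solvSet_contains' vcl total 0 (by omega) total hmem0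
  rcases hE : btA vcl vcl.length (vcl.length + 1) 0 total (List.replicate vcl.length 0)
    with ⟨ok, a⟩
  rw [hE] at A1 A4
  simp only at A1 A4
  cases hs : solvS vcl 0 total with
  | true =>
    rw [hs] at A1 hcon
    subst A1
    have ha : a = greedyS vcl 0 total := by simpa using A4 hs
    subst ha
    rw [if_pos hcon]
    have hg := greedy_fold vcl total vcl.length 0 total [] (by omega) (by omega) hmem0 hs
    rw [Nat.cast_zero] at hg
    rw [hg]
    simp
  | false =>
    rw [hs] at A1 hcon
    subst A1
    have hfalse : ¬ (PySem.Set.contains (solvSetB vcl total vcl.length 0) total = true) := by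
      rw [hcon]
      simp
    rw [if_neg hfalse]
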